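-- pv_equiv track=rewrite | github.com/Wangxiaoyue-lab/PICASSO | sc_omics/scrnaseq/sccs/cropseq_count.py | gen_mismatches
-- ===== SOURCE A (Python) =====
-- import itertools
--
-- def gen_mismatches(sequence,num_mismatches):
--   """
--   generate mismatches of a certain sequence
--   borrow from https://github.com/shendurelab/single-cell-ko-screens/blob/master/get_barcodes.py
--   """
--   letters = 'ACGT'
--   mismatches=[]
--   for locs in itertools.combinations(range(len(sequence)), num_mismatches):
--       sequence_list = [[char] for char in sequence]
--       for loc in locs:
--           orig_char = sequence[loc]
--           sequence_list[loc] = [l for l in letters if l != orig_char]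
--
--       for poss in itertools.product(*sequence_list):
--           mismatches.append(''.join(poss))
--
--   return mismatches
-- ===== SOURCE B (Python) =====
-- import itertools
--
-- def gen_mismatches(sequence, num_mismatches):
--     letters = 'ACGT'
--     mismatches = []
--     for locs in itertools.combinations(range(len(sequence)), num_mismatches):
--         alt_lists = [[l for l in letters if l != sequence[loc]] for loc in locs]
--         # split the sequence once into the fixed pieces around the chosen positions
--         pieces = []
--         prev = 0
--         for loc in locs:
--             pieces.append(sequence[prev:loc])
--             pieces.append('')  # slot for the substituted letter
--             prev = loc + 1
--         pieces.append(sequence[prev:])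
--         for choice in itertools.product(*alt_lists):
--             pieces[1::2] = choice
--             mismatches.append(''.join(pieces))
--     return mismatches
-- ===== Notes on version B (the rewrite author's own statement) =====
-- stated objective: alternative
-- what changed: B iterates itertools.product over only the k lists of alternative letters at the chosen positions and splices each k-tuple into a copy of the sequence, instead of A's product over one list per position of the whole sequence joined wholesale.
import Mathlib
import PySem

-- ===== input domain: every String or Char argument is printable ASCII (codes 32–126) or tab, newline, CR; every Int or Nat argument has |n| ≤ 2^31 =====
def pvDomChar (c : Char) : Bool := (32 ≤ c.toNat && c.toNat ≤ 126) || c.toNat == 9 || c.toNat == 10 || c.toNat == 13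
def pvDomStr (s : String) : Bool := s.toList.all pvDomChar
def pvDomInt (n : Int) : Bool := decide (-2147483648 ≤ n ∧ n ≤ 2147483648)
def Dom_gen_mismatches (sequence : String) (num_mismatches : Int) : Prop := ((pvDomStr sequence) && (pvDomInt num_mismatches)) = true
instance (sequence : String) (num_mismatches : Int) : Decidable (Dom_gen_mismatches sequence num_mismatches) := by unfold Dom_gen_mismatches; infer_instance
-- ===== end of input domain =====

-- B substitutes the chosen alternative letters into a copy of the sequence instead of taking the
-- product over a per-position list for the whole sequence; same output order, no speed claim.

-- itertools.product(*lists) over lists of characters, in CPython's order (shared: both Pythons call it)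
def prodCh : List (List Char) → List (List Char)
  | [] => [[]]
  | l :: ls => l.flatMap (fun x => (prodCh ls).map (x :: ·))

-- ===== PORT A =====
def gen_mismatches (sequence : String) (num_mismatches : Int) : List String :=
  let letters := "ACGT".toList
  let chars := sequence.toList
  (PySem.List.combinations (List.range chars.length) num_mismatches.toNat).foldl
    (fun mismatches locs =>
      let sequence_list := chars.map (fun c => [c])
      let sequence_list := locs.foldl (fun sl loc =>
          let orig_char := chars.getD loc 'A'   -- sequence[loc]; loc < len(sequence) always holds here
          sl.set loc (letters.filter (fun l => l != orig_char))) sequence_list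
      (prodCh sequence_list).foldl (fun ms poss => ms ++ [String.ofList poss]) mismatches) []

-- ===== PORT B =====
-- pieces[0::2] = the fixed segments, pieces[1::2] = the chosen letters; ''.join(pieces) is weave
def weave : List (List Char) → List Char → List Char
  | [], _ => []
  | p :: _, [] => p
  | p :: ps, x :: xs => p ++ x :: weave ps xs

def gen_mismatches_alt (sequence : String) (num_mismatches : Int) : List String :=
  let letters := "ACGT".toList
  let chars := sequence.toList
  (PySem.List.combinations (List.range chars.length) num_mismatches.toNat).foldl
    (fun mismatches locs =>
      let altLists := locs.map (fun loc => letters.filter (fun l => l != chars.getD loc 'A'))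
      let st := locs.foldl (fun (st : List (List Char) × Nat) (loc : Nat) =>
          (st.1 ++ [PySem.List.slice chars (some (st.2 : Int)) (some (loc : Int))], loc + 1)) ([], 0)
      let parts := st.1 ++ [PySem.List.slice chars (some (st.2 : Int)) none]
      (prodCh altLists).foldl (fun ms choice =>
        ms ++ [String.ofList (weave parts choice)]) mismatches) []

-- ===== PRECONDITION & SPEC =====
-- Python raises ValueError on a negative num_mismatches (itertools.combinations); excluded here.
def Pre_gen_mismatches (sequence : String) (num_mismatches : Int) : Prop := 0 ≤ num_mismatches
instance (sequence : String) (num_mismatches : Int) : Decidable (Pre_gen_mismatches sequence num_mismatches) := by unfold Pre_gen_mismatches; infer_instance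
def pvWitness_gen_mismatches : String × Int := ("ACG", 1)

def Spec_gen_mismatches (sequence : String) (num_mismatches : Int) (out : List String) : Prop := out = gen_mismatches_alt sequence num_mismatches
instance (sequence : String) (num_mismatches : Int) (out : List String) : Decidable (Spec_gen_mismatches sequence num_mismatches out) := by unfold Spec_gen_mismatches; infer_instance

-- ===== CLAIM (what is proved, stated in full; the proofs are below) =====
def Claim_equal_gen_mismatches : Prop := ∀ (sequence : String) (num_mismatches : Int), Dom_gen_mismatches sequence num_mismatches → Pre_gen_mismatches sequence num_mismatches → Spec_gen_mismatches sequence num_mismatches (gen_mismatches sequence num_mismatches)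

-- ===== LEMMAS AND PROOFS =====

theorem prodCh_singletons (xs : List Char) : prodCh (xs.map (fun c => [c])) = [xs] := by
  induction xs with
  | nil => rfl
  | cons c cs ih => simp [prodCh, ih]

theorem foldl_setf_cons (f : Nat → List Char) (locs : List Nat)
    (x : List Char) (xs : List (List Char)) (h : ∀ l ∈ locs, 0 < l) :
    locs.foldl (fun sl loc => sl.set loc (f loc)) (x :: xs)
      = x :: locs.foldl (fun sl loc => sl.set (loc - 1) (f loc)) xs := by
  induction locs generalizing xs with
  | nil => rfl
  | cons b rest ih =>
    have hb : 0 < b := h b (List.mem_cons_self ..)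
    have hstep : (x :: xs).set b (f b) = x :: xs.set (b - 1) (f b) := by
      obtain ⟨m, hm⟩ := Nat.exists_eq_add_of_lt hb
      simp [hm]
    simp only [List.foldl_cons, hstep]
    exact ih _ (fun b hb => h b (List.mem_cons_of_mem _ hb))

theorem foldl_setp_cons (ps : List (Nat × Char)) (x : Char) (xs : List Char)
    (h : ∀ p ∈ ps, 0 < p.1) :
    ps.foldl (fun cl lp => cl.set lp.1 lp.2) (x :: xs)
      = x :: ps.foldl (fun cl lp => cl.set (lp.1 - 1) lp.2) xs := by
  induction ps generalizing xs with
  | nil => rfl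
  | cons p rest ih =>
    have hp : 0 < p.1 := h p (List.mem_cons_self ..)
    have hstep : (x :: xs).set p.1 p.2 = x :: xs.set (p.1 - 1) p.2 := by
      obtain ⟨m, hm⟩ := Nat.exists_eq_add_of_lt hp
      simp [hm]
    simp only [List.foldl_cons, hstep]
    exact ih _ (fun q hq => h q (List.mem_cons_of_mem _ hq))

theorem key (alt : Char → List Char) (chars : List Char) : ∀ (locs : List Nat),
    locs.Pairwise (· < ·) → (∀ l ∈ locs, l < chars.length) →
    prodCh (locs.foldl (fun sl loc => sl.set loc (alt (chars.getD loc 'A'))) (chars.map (fun c => [c])))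
      = (prodCh (locs.map (fun loc => alt (chars.getD loc 'A')))).map
          (fun choice => (locs.zip choice).foldl (fun cl lp => cl.set lp.1 lp.2) chars) := by
  induction chars with
  | nil =>
    intro locs _ hb
    cases locs with
    | nil => simp [prodCh]
    | cons l r =>
      have h2 := hb l (List.mem_cons_self ..)
      simp only [List.length_nil] at h2
      omega
  | cons c cs ih =>
    intro locs hs hb
    cases locs with
    | nil => simp [prodCh, prodCh_singletons]
    | cons loc rest =>
      have hgt : ∀ l ∈ rest, loc < l := (List.pairwise_cons.mp hs).1
      have hs' : rest.Pairwise (· < ·) := (List.pairwise_cons.mp hs).2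
      have hshiftA : ∀ (locs' : List Nat) (v : List Char), (∀ l ∈ locs', 0 < l) →
          locs'.foldl (fun sl loc => sl.set loc (alt ((c :: cs).getD loc 'A'))) (v :: cs.map (fun c => [c]))
            = v :: (locs'.map (· - 1)).foldl (fun sl m => sl.set m (alt (cs.getD m 'A'))) (cs.map (fun c => [c])) := by
        intro locs' v h1
        rw [foldl_setf_cons (fun loc => alt ((c :: cs).getD loc 'A')) locs' v _ h1]
        congr 1
        rw [List.foldl_map]
        apply PySem.List.foldl_congr_mem
        intro acc l hl
        obtain ⟨m, hm⟩ := Nat.exists_eq_add_of_lt (h1 l hl)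
        simp [hm]
      have hshiftS : ∀ (locs' : List Nat) (x : Char) (choice : List Char), (∀ l ∈ locs', 0 < l) →
          (locs'.zip choice).foldl (fun cl lp => cl.set lp.1 lp.2) (x :: cs)
            = x :: ((locs'.map (· - 1)).zip choice).foldl (fun cl lp => cl.set lp.1 lp.2) cs := by
        intro locs' x choice h1
        rw [foldl_setp_cons _ _ _ (fun p hp => h1 p.1 (List.of_mem_zip hp).1)]
        rw [List.zip_map_left, List.foldl_map]
        rfl
      have hmapL : ∀ (locs' : List Nat), (∀ l ∈ locs', 0 < l) →
          locs'.map (fun l => alt ((c :: cs).getD l 'A'))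
            = (locs'.map (· - 1)).map (fun m => alt (cs.getD m 'A')) := by
        intro locs' h1
        rw [List.map_map]
        apply List.map_congr_left
        intro l hl
        obtain ⟨m, hm⟩ := Nat.exists_eq_add_of_lt (h1 l hl)
        simp [hm]
      have hPW : ∀ (locs' : List Nat), locs'.Pairwise (· < ·) → (∀ l ∈ locs', 0 < l) →
          (locs'.map (· - 1)).Pairwise (· < ·) := by
        intro locs' hp h1
        rw [List.pairwise_map]
        exact hp.imp_of_mem (fun {a b} ha hb hab => by
          have := h1 a ha; omega)
      have hBD : ∀ (locs' : List Nat), (∀ l ∈ locs', l < (c :: cs).length) → (∀ l ∈ locs', 0 < l) →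
          (∀ m ∈ locs'.map (· - 1), m < cs.length) := by
        intro locs' hbd h1 m hm
        obtain ⟨l, hl, rfl⟩ := List.mem_map.mp hm
        have h2 := hbd l hl
        rw [List.length_cons] at h2
        have h3 := h1 l hl
        omega
      match loc with
      | 0 =>
        have h1 : ∀ l ∈ rest, 0 < l := fun l hl => hgt l hl
        simp only [List.foldl_cons, List.map_cons, List.getD_cons_zero, List.set_cons_zero]
        rw [hshiftA rest (alt c) h1, hmapL rest h1]
        simp only [prodCh]
        rw [ih (rest.map (· - 1)) (hPW rest hs' h1) (hBD rest (fun l hl => hb l (List.mem_cons_of_mem _ hl)) h1)]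
        simp only [List.map_flatMap, List.map_map]
        congr 1
        funext x
        congr 1
        funext choice
        simp only [Function.comp_apply, List.zip_cons_cons, List.foldl_cons, List.set_cons_zero]
        rw [hshiftS rest x choice h1]
      | Nat.succ m =>
        have h1 : ∀ l ∈ (m + 1) :: rest, 0 < l := by
          intro l hl
          rcases List.mem_cons.mp hl with rfl | hl
          · omega
          · have := hgt l hl; omega
        rw [show (c :: cs).map (fun c => [c]) = [c] :: cs.map (fun c => [c]) from rfl,
            hshiftA ((m + 1) :: rest) [c] h1,
            hmapL ((m + 1) :: rest) h1]
        simp only [prodCh]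
        rw [ih (((m + 1) :: rest).map (· - 1)) (hPW _ hs h1) (hBD _ hb h1)]
        simp only [List.flatMap_cons, List.flatMap_nil, List.append_nil, List.map_map]
        congr 1
        funext choice
        simp only [Function.comp_apply]
        rw [hshiftS ((m + 1) :: rest) c choice h1]



theorem length_of_mem_prodCh : ∀ (L : List (List Char)) (cs : List Char),
    cs ∈ prodCh L → cs.length = L.length := by
  intro L
  induction L with
  | nil => intro cs h; simp [prodCh] at h; simp [h]
  | cons l ls ih =>
    intro cs h
    simp only [prodCh, List.mem_flatMap, List.mem_map] at h
    obtain ⟨x, _, t, ht, rfl⟩ := h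
    simp [ih t ht]

def segs (chars : List Char) : Nat → List Nat → List (List Char)
  | p, [] => [chars.drop p]
  | p, l :: r => ((chars.drop p).take (l - p)) :: segs chars (l + 1) r

theorem partsFold_eq (chars : List Char) : ∀ (locs : List Nat) (acc : List (List Char)) (p : Nat),
    (locs.foldl (fun (st : List (List Char) × Nat) loc =>
        (st.1 ++ [(chars.drop st.2).take (loc - st.2)], loc + 1)) (acc, p)).1
      ++ [chars.drop (locs.foldl (fun (st : List (List Char) × Nat) loc =>
        (st.1 ++ [(chars.drop st.2).take (loc - st.2)], loc + 1)) (acc, p)).2]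
    = acc ++ segs chars p locs := by
  intro locs
  induction locs with
  | nil => intro acc p; simp [segs]
  | cons l r ih =>
    intro acc p
    simp only [List.foldl_cons, segs]
    rw [ih]
    simp

theorem foldl_setp_shift (m : Nat) : ∀ (ps : List (Nat × Char)) (u v : List Char),
    u.length = m → (∀ p ∈ ps, m ≤ p.1) →
    ps.foldl (fun cl lp => cl.set lp.1 lp.2) (u ++ v)
      = u ++ ps.foldl (fun cl lp => cl.set (lp.1 - m) lp.2) v := by
  intro ps
  induction ps with
  | nil => intro u v _ _; rfl
  | cons q rest ih =>
    intro u v hu h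
    have hq : m ≤ q.1 := h q (List.mem_cons_self ..)
    simp only [List.foldl_cons]
    rw [show (u ++ v).set q.1 q.2 = u ++ v.set (q.1 - u.length) q.2 from
          List.set_append_right _ _ (by omega), hu]
    exact ih u _ hu (fun p hp => h p (List.mem_cons_of_mem _ hp))

theorem foldl_setp_cons' (ps : List (Nat × Char)) (x : Char) (xs : List Char)
    (h : ∀ p ∈ ps, 0 < p.1) :
    ps.foldl (fun cl lp => cl.set lp.1 lp.2) (x :: xs)
      = x :: ps.foldl (fun cl lp => cl.set (lp.1 - 1) lp.2) xs := by
  have := foldl_setp_shift 1 ps [x] xs rfl (fun p hp => h p hp)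
  simpa using this

theorem zipfold_map (f : Nat → Nat) (locs : List Nat) (choice : List Char) (init : List Char) :
    ((locs.map f).zip choice).foldl (fun cl lp => cl.set lp.1 lp.2) init
      = (locs.zip choice).foldl (fun cl lp => cl.set (f lp.1) lp.2) init := by
  rw [List.zip_map_left, List.foldl_map]
  rfl

theorem weave_splice (chars : List Char) : ∀ (locs : List Nat) (choice : List Char) (p : Nat),
    locs.Pairwise (· < ·) → (∀ l ∈ locs, p ≤ l ∧ l < chars.length) →
    choice.length = locs.length →
    weave (segs chars p locs) choice
      = ((locs.map (· - p)).zip choice).foldl (fun cl lp => cl.set lp.1 lp.2) (chars.drop p) := by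
  intro locs
  induction locs with
  | nil =>
    intro choice p _ _ hlen
    cases choice with
    | nil => simp [segs, weave]
    | cons a as => simp at hlen
  | cons l r ih =>
    intro choice p hpw hbd hlen
    cases choice with
    | nil => simp at hlen
    | cons x xs =>
      have hl : p ≤ l ∧ l < chars.length := hbd l (List.mem_cons_self ..)
      have hgt : ∀ q ∈ r, l < q := (List.pairwise_cons.mp hpw).1
      have hr : ∀ q ∈ r, l + 1 ≤ q ∧ q < chars.length := fun q hq =>
        ⟨hgt q hq, (hbd q (List.mem_cons_of_mem _ hq)).2⟩
      have hu : ((chars.drop p).take (l - p)).length = l - p := by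
        simp [List.length_take, List.length_drop]; omega
      have hmapl : (r.map (· - p)).map (· - (l - p)) = r.map (· - l) := by
        rw [List.map_map]
        apply List.map_congr_left
        intro q hq
        have := hgt q hq
        simp only [Function.comp_apply]
        omega
      have hmapl1 : (r.map (· - l)).map (· - 1) = r.map (· - (l + 1)) := by
        rw [List.map_map]
        apply List.map_congr_left
        intro q hq
        simp only [Function.comp_apply]
        omega
      -- the first substitution lands exactly on chars[l]
      have hsplit : (chars.drop p).set (l - p) x
          = (chars.drop p).take (l - p) ++ x :: chars.drop (l + 1) := by
        conv_lhs => rw [← List.take_append_drop (l - p) (chars.drop p)]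
        rw [List.drop_drop, Nat.add_sub_cancel' hl.1,
            List.drop_eq_getElem_cons hl.2,
            List.set_append_right _ _ (by omega), hu, Nat.sub_self, List.set_cons_zero]
      simp only [segs, weave, List.map_cons, List.zip_cons_cons, List.foldl_cons]
      rw [hsplit,
          foldl_setp_shift (l - p) _ _ _ hu (fun q hq => by
            obtain ⟨n, hn, he⟩ := List.mem_map.mp (List.of_mem_zip hq).1
            have := hgt n hn
            omega)]
      congr 1
      rw [← zipfold_map (· - (l - p)) (r.map (· - p)) xs, hmapl,
          foldl_setp_cons' _ _ _ (fun q hq => by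
            obtain ⟨n, hn, he⟩ := List.mem_map.mp (List.of_mem_zip hq).1
            have := hgt n hn
            omega),
          ← zipfold_map (· - 1) (r.map (· - l)) xs, hmapl1,
          ih xs (l + 1) (List.pairwise_cons.mp hpw).2 hr (by simpa using hlen)]

-- ===== VERDICT (by name: the statement is the Claim_ definition above) =====
theorem gen_mismatches_spec : Claim_equal_gen_mismatches := by
  intro s k _ _
  unfold Spec_gen_mismatches gen_mismatches gen_mismatches_alt
  dsimp only
  apply PySem.List.foldl_congr_mem
  intro acc locs hmem
  have hsub : locs.Sublist (List.range s.toList.length) :=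
    PySem.List.sublist_of_mem_combinations hmem
  have hpw : locs.Pairwise (· < ·) := (List.pairwise_lt_range).sublist hsub
  have hbd : ∀ l ∈ locs, l < s.toList.length := fun l hl => List.mem_range.mp (hsub.subset hl)
  rw [PySem.List.foldl_append_singleton_eq_map, PySem.List.foldl_append_singleton_eq_map,
      key (fun ch => "ACGT".toList.filter (fun l => l != ch)) s.toList locs hpw hbd,
      List.map_map]
  congr 1
  apply List.map_congr_left
  intro choice hch
  have hlen : choice.length = locs.length := by
    rw [length_of_mem_prodCh _ _ hch, List.length_map]
  simp only [Function.comp_apply, PySem.List.slice_natCast, PySem.List.slice_from_natCast]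
  rw [partsFold_eq s.toList locs [] 0, List.nil_append,
      weave_splice s.toList locs choice 0 hpw (fun l hl => ⟨Nat.zero_le _, hbd l hl⟩) hlen]
  simp only [Nat.sub_zero, List.drop_zero, List.map_id']
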